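-- pv_equiv track=rewrite | github.com/subhan-liaqat/LeetCode-Problems | 0321-create-maximum-number/0321-create-maximum-number.py | find_ranks
-- ===== SOURCE A (Python) =====
-- def find_ranks(nums):
--     n = len(nums)
--     ranks, moving_rank, st = [0] * n, 0, [0]
--     for i in range(1, n):
--         while len(st) > 0 and nums[st[-1]] < nums[i]:
--             e = st.pop()
--             ranks[e] = n - moving_rank
--             moving_rank += 1
--         st.append(i)
--     while st:
--         e = st.pop()
--         ranks[e] = n - moving_rank
--         moving_rank += 1
--     return ranks
-- ===== SOURCE B (Python) =====
-- def find_ranks(nums):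
--     # Two-phase: a next-strictly-greater table, then one sort.
--     # Rank by how soon a strictly greater element follows: the later that
--     # happens, the higher the rank; among equals the later index ranks higher.
--     n = len(nums)
--     nge = [next((j for j in range(i + 1, n) if nums[j] > nums[i]), n) for i in range(n)]
--     order = sorted(range(n), key=lambda i: (nge[i], -i))
--     ranks = [0] * n
--     for k, i in enumerate(order):
--         ranks[i] = n - k
--     return ranks
-- ===== Notes on version B (the rewrite author's own statement) =====
-- stated objective: alternative
-- what changed: Replaces A's single monotonic-stack pass by a two-phase table-then-sort decomposition: a next-strictly-greater table nge built by a nested scan, then the indices sorted by (nge[i] ascending, index descending) and ranks n-k assigned along that order; Pre_ excludes only the empty list, on which A raises IndexError.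
import Mathlib
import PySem

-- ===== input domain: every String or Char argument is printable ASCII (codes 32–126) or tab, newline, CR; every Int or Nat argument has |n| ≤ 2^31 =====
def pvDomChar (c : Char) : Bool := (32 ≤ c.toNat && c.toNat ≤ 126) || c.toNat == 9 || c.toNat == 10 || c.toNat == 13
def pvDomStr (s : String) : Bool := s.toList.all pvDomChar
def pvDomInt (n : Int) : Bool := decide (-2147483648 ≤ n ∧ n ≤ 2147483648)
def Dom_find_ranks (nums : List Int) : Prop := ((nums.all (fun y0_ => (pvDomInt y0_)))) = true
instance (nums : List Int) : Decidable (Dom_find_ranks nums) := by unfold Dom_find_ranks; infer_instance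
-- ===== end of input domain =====

-- B replaces A's monotonic-stack pass by a next-strictly-greater table plus one sort
-- (objective: alternative algorithm, not faster). No argument is mutated by either side.

-- ===== PORT A =====
-- Python keeps the stack's top at the END of the list `st`; the port keeps the top at
-- the HEAD (push/pop at the head), the same stack with the same pop order.
-- The inner `while` loop of A:
def pvPopWhile (nums : List Int) (n : Nat) (x : Int) :
    List Nat → List Int → Nat → List Nat × List Int × Nat
  | [], ranks, mr => ([], ranks, mr)
  | e :: st, ranks, mr =>
    if nums.getD e 0 < x then
      pvPopWhile nums n x st (ranks.set e ((n : Int) - mr)) (mr + 1)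
    else (e :: st, ranks, mr)

-- The final `while st:` loop of A:
def pvPopAll (n : Nat) : List Nat → List Int → Nat → List Int
  | [], ranks, _ => ranks
  | e :: st, ranks, mr => pvPopAll n st (ranks.set e ((n : Int) - mr)) (mr + 1)

-- The `for i in range(1, n)` loop of A:
def pvLoopA (nums : List Int) (n : Nat) : List Nat → List Nat → List Int → Nat → List Int
  | [], st, ranks, mr => pvPopAll n st ranks mr
  | i :: is, st, ranks, mr =>
    let r := pvPopWhile nums n (nums.getD i 0) st ranks mr
    pvLoopA nums n is (i :: r.1) r.2.1 r.2.2

def find_ranks (nums : List Int) : List Int :=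
  pvLoopA nums nums.length (List.range' 1 (nums.length - 1)) [0]
    (List.replicate nums.length 0) 0

-- ===== PORT B =====
-- first j ≥ j0 with x < nums[j], else n (the `next(...)` generator of Source B):
def pvNgeLoop (nums : List Int) (x : Int) (j : Nat) : Nat :=
  if j < nums.length then
    (if x < nums.getD j 0 then j else pvNgeLoop nums x (j + 1))
  else nums.length
termination_by nums.length - j
decreasing_by omega

def pvNge (nums : List Int) (i : Nat) : Nat := pvNgeLoop nums (nums.getD i 0) (i + 1)

def find_ranks_alt (nums : List Int) : List Int :=
  let n := nums.length
  let nge := (List.range n).map (fun i => pvNge nums i)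
  let order := PySem.List.sorted2 (List.range n)
    (fun i => nge.getD i 0) (fun i => -(i : Int))
  (PySem.List.enumerate order).foldl
    (fun ranks ki => ranks.set ki.2 ((n : Int) - ki.1)) (List.replicate n 0)

-- ===== PRECONDITION & SPEC =====
-- Pre_ excludes only the empty list, on which A raises IndexError
-- (it pops the seeded index 0 into the empty `ranks` list).
def Pre_find_ranks (nums : List Int) : Prop := nums ≠ []
instance (nums : List Int) : Decidable (Pre_find_ranks nums) := by unfold Pre_find_ranks; infer_instance
def pvWitness_find_ranks : List Int := [2, 1, 3]

def Spec_find_ranks (nums : List Int) (out : List Int) : Prop := out = find_ranks_alt nums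
instance (nums : List Int) (out : List Int) : Decidable (Spec_find_ranks nums out) := by unfold Spec_find_ranks; infer_instance

-- ===== CLAIM (what is proved, stated in full; the proofs are below) =====
def Claim_equal_find_ranks : Prop := ∀ (nums : List Int), Dom_find_ranks nums → Pre_find_ranks nums → Spec_find_ranks nums (find_ranks nums)

-- ===== LEMMAS AND PROOFS =====

-- value at index k (all accesses are in range on the admitted inputs)
def pvV (nums : List Int) (k : Nat) : Int := nums.getD k 0
-- the number of indices j whose key (nge j, -j) is lexicographically below (nge i, -i)
def pvP (nums : List Int) (i : Nat) : Nat :=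
  ((List.range nums.length).filter (fun j =>
    decide (pvNge nums j < pvNge nums i ∨ (pvNge nums j = pvNge nums i ∧ i < j)))).length
-- the indices popped while processing index x (popped when x arrives), ascending
def pvL (nums : List Int) (x : Nat) : List Nat :=
  (List.range x).filter (fun k => decide (pvNge nums k = x))
-- loop invariants: moving_rank, stack (top at head) and ranks after processing indices 0..i
def pvMr (nums : List Int) (i : Nat) : Nat :=
  ((List.range nums.length).filter (fun k => decide (pvNge nums k ≤ i))).length
def pvStack (nums : List Int) (i : Nat) : List Nat :=
  ((List.range (i + 1)).filter (fun k => decide (i < pvNge nums k))).reverse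
def pvRanks (nums : List Int) (i : Nat) : List Int :=
  (List.range nums.length).map (fun k =>
    if pvNge nums k ≤ i then (nums.length : Int) - pvP nums k else 0)
-- a single Nat key realising B's lexicographic sort key (nge i, -i) on indices < length
def pvKey (nums : List Int) (i : Nat) : Nat :=
  pvNge nums i * (nums.length + 1) + (nums.length - i)

-- ---- nge facts ----
lemma pvNgeLoop_le (nums : List Int) (x : Int) (j : Nat) : pvNgeLoop nums x j ≤ nums.length := by
  fun_induction pvNgeLoop nums x j with
  | case1 j h hx => omega
  | case2 j h hx ih => exact ih
  | case3 j h => omega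

lemma pvNgeLoop_ge (nums : List Int) (x : Int) (j : Nat) (h : j ≤ nums.length) :
    j ≤ pvNgeLoop nums x j := by
  fun_induction pvNgeLoop nums x j with
  | case1 j h hx => omega
  | case2 j h hx ih => exact Nat.le_trans (by omega) (ih (by omega))
  | case3 j h => omega

lemma pvNgeLoop_mid (nums : List Int) (x : Int) (j k : Nat) (h1 : j ≤ k)
    (h2 : k < pvNgeLoop nums x j) : pvV nums k ≤ x := by
  fun_induction pvNgeLoop nums x j with
  | case1 j h hx => omega
  | case2 j h hx ih =>
      rcases Nat.eq_or_lt_of_le h1 with rfl | hlt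
      · simpa [pvV] using hx
      · exact ih hlt h2
  | case3 j h => omega

lemma pvNgeLoop_hit (nums : List Int) (x : Int) (j : Nat)
    (h : pvNgeLoop nums x j < nums.length) : x < pvV nums (pvNgeLoop nums x j) := by
  fun_induction pvNgeLoop nums x j with
  | case1 j h hx => simpa [pvV] using hx
  | case2 j h hx ih => exact ih h
  | case3 j h => omega

lemma pvNge_gt (nums : List Int) (i : Nat) (hi : i < nums.length) : i < pvNge nums i :=
  Nat.lt_of_lt_of_le (Nat.lt_succ_self i) (pvNgeLoop_ge nums _ (i + 1) hi)

lemma pvNge_le (nums : List Int) (i : Nat) : pvNge nums i ≤ nums.length :=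
  pvNgeLoop_le nums _ (i + 1)

lemma pvNge_mid (nums : List Int) (i k : Nat) (h1 : i < k) (h2 : k < pvNge nums i) :
    pvV nums k ≤ pvV nums i :=
  pvNgeLoop_mid nums _ (i + 1) k h1 h2

lemma pvNge_hit (nums : List Int) (i : Nat) (h : pvNge nums i < nums.length) :
    pvV nums i < pvV nums (pvNge nums i) :=
  pvNgeLoop_hit nums _ (i + 1) h

lemma pvNge_le_of (nums : List Int) (i k : Nat) (h1 : i < k)
    (h3 : pvV nums i < pvV nums k) : pvNge nums i ≤ k := by
  by_contra h
  exact absurd (pvNge_mid nums i k h1 (by omega)) (by omega)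

-- ---- generic list lemmas ----
lemma pv_filter_split {α : Type} (Q R : α → Bool) (l : List α)
    (hd : ∀ a ∈ l, ¬(Q a = true ∧ R a = true))
    (hpw : List.Pairwise (fun a b => R a = true → Q b = false) l) :
    l.filter (fun a => Q a || R a) = l.filter Q ++ l.filter R := by
  induction l with
  | nil => simp
  | cons a l ih =>
    rw [List.pairwise_cons] at hpw
    obtain ⟨h1, h2⟩ := hpw
    have hd' : ∀ a ∈ l, ¬(Q a = true ∧ R a = true) := fun b hb => hd b (List.mem_cons_of_mem a hb)
    by_cases hR : R a = true
    · have hQ : Q a = false := by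
        rcases Bool.eq_false_or_eq_true (Q a) with h | h
        · exact absurd ⟨h, hR⟩ (hd a List.mem_cons_self)
        · exact h
      have hnil : l.filter Q = [] := List.filter_eq_nil_iff.mpr (fun b hb => by simp [h1 b hb hR])
      have hnil2 : l.filter (fun a => Q a || R a) = l.filter R := by
        rw [ih hd' h2, hnil]; simp
      simp [hQ, hR, hnil, hnil2]
    · have hR' : R a = false := by simpa using hR
      by_cases hQ : Q a = true
      · simp [hQ, hR', ih hd' h2]
      · have hQ' : Q a = false := by simpa using hQ
        simp [hQ', hR', ih hd' h2]

lemma pv_length_filter_split {α : Type} (Q R : α → Bool) (l : List α)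
    (hd : ∀ a ∈ l, ¬(Q a = true ∧ R a = true)) :
    (l.filter (fun a => Q a || R a)).length = (l.filter Q).length + (l.filter R).length := by
  induction l with
  | nil => simp
  | cons a l ih =>
    have hd' : ∀ a ∈ l, ¬(Q a = true ∧ R a = true) := fun b hb => hd b (List.mem_cons_of_mem a hb)
    have := ih hd'
    by_cases hQ : Q a = true
    · have hR : R a = false := by
        rcases Bool.eq_false_or_eq_true (R a) with h | h
        · exact absurd ⟨hQ, h⟩ (hd a List.mem_cons_self)
        · exact h
      simp [hQ, hR, this]; omega
    · have hQ' : Q a = false := by simpa using hQ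
      by_cases hR : R a = true
      · simp [hQ', hR, this]; omega
      · have hR' : R a = false := by simpa using hR
        simp [hQ', hR', this]

lemma pv_filter_range_ext (P : Nat → Bool) (m n : Nat) (h : m ≤ n)
    (h2 : ∀ j, m ≤ j → j < n → P j = false) :
    (List.range n).filter P = (List.range m).filter P := by
  induction n, h using Nat.le_induction with
  | base => rfl
  | succ n hmn ih =>
    rw [List.range_succ, List.filter_append]
    have hP : P n = false := h2 n hmn (by omega)
    simp only [List.filter_cons, hP, Bool.false_eq_true, if_false, List.filter_nil, List.append_nil]
    exact ih (fun j hj1 hj2 => h2 j hj1 (by omega))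

lemma pv_idxOf_desc (l : List Nat) (h : List.Pairwise (fun a b => b < a) l) (k : Nat)
    (hk : k ∈ l) : l.idxOf k = (l.filter (fun j => decide (k < j))).length := by
  induction l with
  | nil => simp at hk
  | cons a l ih =>
    rw [List.pairwise_cons] at h
    obtain ⟨h1, h2⟩ := h
    rcases List.mem_cons.mp hk with rfl | hk'
    · have : l.filter (fun j => decide (k < j)) = [] :=
        List.filter_eq_nil_iff.mpr (fun b hb => by have := h1 b hb; simp; omega)
      simp [this]
    · have hka : k < a := h1 k hk'
      have hne : k ≠ a := by omega
      rw [List.idxOf_cons_ne _ (fun h => hne h.symm), ih h2 hk']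
      simp [hka]

-- position of an element in a list whose keys strictly increase = count of smaller keys
lemma pv_idxOf_asc (K : Nat → Nat) (l : List Nat)
    (h : List.Pairwise (fun a b => K a < K b) l) (k : Nat) (hk : k ∈ l) :
    l.idxOf k = (l.filter (fun j => decide (K j < K k))).length := by
  induction l with
  | nil => simp at hk
  | cons a l ih =>
    rw [List.pairwise_cons] at h
    obtain ⟨h1, h2⟩ := h
    rcases List.mem_cons.mp hk with rfl | hk'
    · have : l.filter (fun j => decide (K j < K k)) = [] :=
        List.filter_eq_nil_iff.mpr (fun b hb => by have := h1 b hb; simp; omega)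
      simp [this]
    · have hak : K a < K k := h1 k hk'
      have hne : k ≠ a := fun h => by subst h; omega
      rw [List.idxOf_cons_ne _ (fun h => hne h.symm), ih h2 hk']
      simp [hak]

-- ---- popWhile / popAll ----
lemma pvPopWhile_eq (nums : List Int) (n : Nat) (x : Int) (pop : List Nat) :
    ∀ (keep : List Nat) (ranks : List Int) (mr : Nat),
    (∀ k ∈ pop, nums.getD k 0 < x) → (∀ k ∈ keep, ¬(nums.getD k 0 < x)) →
    pvPopWhile nums n x (pop ++ keep) ranks mr
      = (keep, pvPopAll n pop ranks mr, mr + pop.length) := by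
  induction pop with
  | nil =>
    intro keep ranks mr _ hkeep
    cases keep with
    | nil => simp [pvPopWhile, pvPopAll]
    | cons e ks =>
      simp only [List.nil_append, pvPopWhile, pvPopAll]
      rw [if_neg (hkeep e List.mem_cons_self)]
      simp
  | cons e es ih =>
    intro keep ranks mr hpop hkeep
    simp only [List.cons_append, pvPopWhile]
    rw [if_pos (hpop e List.mem_cons_self)]
    rw [ih keep _ _ (fun k hk => hpop k (List.mem_cons_of_mem e hk)) hkeep]
    simp only [pvPopAll, List.length_cons, Prod.mk.injEq, true_and]
    omega

lemma pvPopAll_length (n : Nat) (st : List Nat) :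
    ∀ (ranks : List Int) (mr : Nat), (pvPopAll n st ranks mr).length = ranks.length := by
  induction st with
  | nil => intro ranks mr; rfl
  | cons e es ih => intro ranks mr; simp [pvPopAll, ih, List.length_set]

lemma pvPopAll_getElem (n : Nat) (st : List Nat) :
    ∀ (ranks : List Int) (mr k : Nat) (_ : st.Nodup) (hk : k < ranks.length),
    (pvPopAll n st ranks mr)[k]'(by rw [pvPopAll_length]; exact hk)
      = if k ∈ st then (n : Int) - ((mr + st.idxOf k : Nat) : Int) else ranks[k] := by
  induction st with
  | nil => intro ranks mr k _ hk; simp [pvPopAll]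
  | cons e es ih =>
    intro ranks mr k hnd hk
    rw [List.nodup_cons] at hnd
    obtain ⟨he, hnd'⟩ := hnd
    have hk' : k < (ranks.set e ((n : Int) - mr)).length := by simpa using hk
    simp only [pvPopAll]
    rw [ih (ranks.set e ((n : Int) - mr)) (mr + 1) k hnd' hk']
    by_cases hkes : k ∈ es
    · have hne : k ≠ e := fun h => he (h ▸ hkes)
      have hidx : (e :: es).idxOf k = es.idxOf k + 1 :=
        List.idxOf_cons_ne _ (fun h => hne h.symm)
      simp only [if_true, List.mem_cons, hkes, or_true, if_true, hidx]
      congr 1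
      push_cast
      ring
    · simp only [hkes, if_false]
      by_cases hke : k = e
      · subst hke
        have : k ∈ k :: es := List.mem_cons_self
        simp only [this, if_true, List.idxOf_cons_self, Nat.add_zero]
        rw [List.getElem_set_self (by simpa using hk)]
      · have : k ∉ e :: es := by simp [hke, hkes]
        simp only [this, if_false]
        rw [List.getElem_set_ne (fun h => hke (by omega))]

-- ---- level lemmas ----
lemma pvP_eq (nums : List Int) (k x : Nat) (hk : k < nums.length) (hN : pvNge nums k = x) :
    pvP nums k = pvMr nums (x - 1) + ((pvL nums x).filter (fun j => decide (k < j))).length := by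
  have hx1 : 1 ≤ x := by have := pvNge_gt nums k hk; omega
  have hxn : x ≤ nums.length := hN ▸ pvNge_le nums k
  have hstep1 : ((List.range nums.length).filter (fun j =>
      decide (pvNge nums j < pvNge nums k ∨ (pvNge nums j = pvNge nums k ∧ k < j))))
    = ((List.range nums.length).filter (fun j =>
      (decide (pvNge nums j ≤ x - 1)) || ((decide (pvNge nums j = x)) && decide (k < j)))) := by
    apply List.filter_congr
    intro j _
    rw [hN]
    rw [Bool.eq_iff_iff]
    simp only [Bool.or_eq_true, Bool.and_eq_true, decide_eq_true_eq]
    omega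
  unfold pvP
  rw [hstep1, pv_length_filter_split _ _ _ (fun j _ => by
    simp only [Bool.and_eq_true, decide_eq_true_eq]
    omega)]
  congr 1
  have hext : ((List.range nums.length).filter (fun j =>
      (decide (pvNge nums j = x)) && decide (k < j)))
    = ((List.range x).filter (fun j => (decide (pvNge nums j = x)) && decide (k < j))) := by
    apply pv_filter_range_ext _ _ _ hxn
    intro j hj1 hj2
    have := pvNge_gt nums j hj2
    simp only [Bool.and_eq_false_iff, decide_eq_false_iff_not]
    left; omega
  rw [hext]
  unfold pvL
  rw [List.filter_filter]
  congr 1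
  apply List.filter_congr
  intro j _
  exact (Bool.and_comm _ _)

lemma pvMr_step (nums : List Int) (x : Nat) (h1 : 1 ≤ x) (h2 : x ≤ nums.length) :
    pvMr nums x = pvMr nums (x - 1) + (pvL nums x).length := by
  unfold pvMr
  have hstep1 : ((List.range nums.length).filter (fun k => decide (pvNge nums k ≤ x)))
    = ((List.range nums.length).filter (fun k =>
        (decide (pvNge nums k ≤ x - 1)) || decide (pvNge nums k = x))) := by
    apply List.filter_congr
    intro j _
    rw [Bool.eq_iff_iff]
    simp only [Bool.or_eq_true, decide_eq_true_eq]
    omega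
  rw [hstep1, pv_length_filter_split _ _ _ (fun j _ => by
    simp only [decide_eq_true_eq]
    omega)]
  congr 1
  have hext : ((List.range nums.length).filter (fun j => decide (pvNge nums j = x)))
    = ((List.range x).filter (fun j => decide (pvNge nums j = x))) := by
    apply pv_filter_range_ext _ _ _ h2
    intro j hj1 hj2
    have := pvNge_gt nums j hj2
    simp only [decide_eq_false_iff_not]
    omega
  rw [hext]
  rfl

lemma pvRanks_step (nums : List Int) (x : Nat) (h1 : 1 ≤ x) (_h2 : x ≤ nums.length) :
    pvPopAll nums.length ((pvL nums x).reverse) (pvRanks nums (x - 1)) (pvMr nums (x - 1))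
      = pvRanks nums x := by
  have hnodup : ((pvL nums x).reverse).Nodup :=
    List.nodup_reverse.mpr (List.nodup_range.filter _)
  apply List.ext_getElem
  · rw [pvPopAll_length]
    simp [pvRanks]
  · intro k h1' h2'
    have hk : k < nums.length := by simpa [pvRanks] using h2'
    have hklen : k < (pvRanks nums (x - 1)).length := by simpa [pvRanks]
    rw [pvPopAll_getElem _ _ _ _ _ hnodup hklen]
    have hmemiff : k ∈ (pvL nums x).reverse ↔ (k < x ∧ pvNge nums k = x) := by
      simp [pvL, List.mem_filter, List.mem_range]
    have hRx : (pvRanks nums x)[k]'h2'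
        = if pvNge nums k ≤ x then (nums.length : Int) - pvP nums k else 0 := by
      simp [pvRanks]
    rw [hRx]
    by_cases hmem : k ∈ (pvL nums x).reverse
    · obtain ⟨hkx, hNk⟩ := hmemiff.mp hmem
      rw [if_pos hmem, if_pos (by omega)]
      have hdesc : ((pvL nums x).reverse).Pairwise (fun a b => b < a) := by
        rw [List.pairwise_reverse]
        exact (List.pairwise_lt_range).filter _
      rw [pv_idxOf_desc _ hdesc _ hmem]
      rw [List.filter_reverse, List.length_reverse]
      rw [← pvP_eq nums k x hk hNk]
    · rw [if_neg hmem]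
      have hNkne : pvNge nums k ≠ x := by
        intro hNk
        exact hmem (hmemiff.mpr ⟨by have := pvNge_gt nums k hk; omega, hNk⟩)
      have hRx1 : (pvRanks nums (x - 1))[k]'hklen
          = if pvNge nums k ≤ x - 1 then (nums.length : Int) - pvP nums k else 0 := by
        simp [pvRanks]
      rw [hRx1]
      by_cases hle : pvNge nums k ≤ x - 1
      · rw [if_pos hle, if_pos (by omega)]
      · rw [if_neg hle, if_neg (by omega)]

lemma pvStack_split (nums : List Int) (i : Nat) (h : i + 1 < nums.length) :
    pvStack nums i
      = (pvL nums (i + 1)).reverse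
        ++ ((List.range (i + 1)).filter (fun k => decide (i + 1 < pvNge nums k))).reverse := by
  unfold pvStack
  have hstep1 : ((List.range (i + 1)).filter (fun k => decide (i < pvNge nums k)))
    = ((List.range (i + 1)).filter (fun k =>
        (decide (i + 1 < pvNge nums k)) || decide (pvNge nums k = i + 1))) := by
    apply List.filter_congr
    intro j _
    rw [Bool.eq_iff_iff]
    simp only [Bool.or_eq_true, decide_eq_true_eq]
    omega
  rw [hstep1]
  rw [pv_filter_split _ _ _ (fun j _ => by
      simp only [decide_eq_true_eq]
      omega)
    (by
      apply List.Pairwise.imp_of_mem ?_ (List.pairwise_lt_range (n := i + 1))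
      intro a b ha hb hab hRa
      rw [List.mem_range] at ha hb
      rw [decide_eq_true_eq] at hRa
      have hva : pvV nums b ≤ pvV nums a := pvNge_mid nums a b hab (by omega)
      have hvx : pvV nums a < pvV nums (i + 1) := by
        have := pvNge_hit nums a (by omega)
        rwa [hRa] at this
      have hble : pvNge nums b ≤ i + 1 := pvNge_le_of nums b (i + 1) (by omega) (by omega)
      simp only [decide_eq_false_iff_not]
      omega)]
  rw [List.reverse_append]
  rfl

lemma pvStack_last (nums : List Int) (h : 1 ≤ nums.length) :
    pvStack nums (nums.length - 1) = (pvL nums nums.length).reverse := by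
  unfold pvStack pvL
  have hn : nums.length - 1 + 1 = nums.length := by omega
  rw [hn]
  congr 1
  apply List.filter_congr
  intro j hj
  rw [List.mem_range] at hj
  have := pvNge_le nums j
  rw [Bool.eq_iff_iff]
  simp only [decide_eq_true_eq]
  omega

-- ---- main loop invariant (A side) ----
lemma pvLoop_inv (nums : List Int) (m : Nat) :
    ∀ (i : Nat), i < nums.length → m = nums.length - 1 - i →
    pvLoopA nums nums.length (List.range' (i + 1) m) (pvStack nums i)
        (pvRanks nums i) (pvMr nums i)
      = (List.range nums.length).map (fun k => (nums.length : Int) - pvP nums k) := by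
  induction m with
  | zero =>
    intro i hi hm
    have hi' : i = nums.length - 1 := by omega
    subst hi'
    rw [List.range'_zero]
    show pvPopAll nums.length (pvStack nums (nums.length - 1))
        (pvRanks nums (nums.length - 1)) (pvMr nums (nums.length - 1)) = _
    rw [pvStack_last nums (by omega)]
    rw [pvRanks_step nums nums.length (by omega) (le_refl _)]
    unfold pvRanks
    apply List.map_congr_left
    intro k hk
    rw [List.mem_range] at hk
    rw [if_pos (pvNge_le nums k)]
  | succ m ih =>
    intro i hi hm
    have hin : i + 1 < nums.length := by omega
    have hpop : ∀ k ∈ (pvL nums (i + 1)).reverse, nums.getD k 0 < nums.getD (i + 1) 0 := by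
      intro k hkm
      rw [List.mem_reverse] at hkm
      unfold pvL at hkm
      rw [List.mem_filter, List.mem_range, decide_eq_true_eq] at hkm
      obtain ⟨hkx, hNk⟩ := hkm
      have := pvNge_hit nums k (by omega)
      rw [hNk] at this
      exact this
    have hkeep : ∀ k ∈ ((List.range (i + 1)).filter
        (fun k => decide (i + 1 < pvNge nums k))).reverse,
        ¬(nums.getD k 0 < nums.getD (i + 1) 0) := by
      intro k hkm
      rw [List.mem_reverse, List.mem_filter, List.mem_range, decide_eq_true_eq] at hkm
      obtain ⟨hkx, hNk⟩ := hkm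
      have := pvNge_mid nums k (i + 1) (by omega) hNk
      exact not_lt.mpr this
    rw [List.range'_succ]
    show pvLoopA nums nums.length (List.range' (i + 1 + 1) m)
        ((i + 1) :: (pvPopWhile nums nums.length (nums.getD (i + 1) 0)
          (pvStack nums i) (pvRanks nums i) (pvMr nums i)).1)
        (pvPopWhile nums nums.length (nums.getD (i + 1) 0)
          (pvStack nums i) (pvRanks nums i) (pvMr nums i)).2.1
        (pvPopWhile nums nums.length (nums.getD (i + 1) 0)
          (pvStack nums i) (pvRanks nums i) (pvMr nums i)).2.2 = _
    rw [pvStack_split nums i hin]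
    rw [pvPopWhile_eq nums nums.length (nums.getD (i + 1) 0) _ _ _ _ hpop hkeep]
    have hstk : pvStack nums (i + 1)
        = (i + 1) :: ((List.range (i + 1)).filter
            (fun k => decide (i + 1 < pvNge nums k))).reverse := by
      unfold pvStack
      rw [List.range_succ, List.filter_append]
      have hself : decide (i + 1 < pvNge nums (i + 1)) = true := by
        simp [pvNge_gt nums (i + 1) hin]
      simp [hself]
    have hrk : pvPopAll nums.length ((pvL nums (i + 1)).reverse)
        (pvRanks nums i) (pvMr nums i) = pvRanks nums (i + 1) := by
      exact pvRanks_step nums (i + 1) (by omega) (by omega)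
    have hmr : pvMr nums i + ((pvL nums (i + 1)).reverse).length = pvMr nums (i + 1) := by
      rw [List.length_reverse]
      have h := pvMr_step nums (i + 1) (by omega) (by omega)
      have h' : pvMr nums (i + 1 - 1) = pvMr nums i := rfl
      rw [h'] at h
      omega
    rw [← hstk, hrk, hmr]
    exact ih (i + 1) hin (by omega)

-- ---- B side: the sort and the assignment loop ----
lemma pvKey_lt_iff (nums : List Int) (a b : Nat)
    (ha : a < nums.length) (hb : b < nums.length) :
    pvKey nums a < pvKey nums b
      ↔ (pvNge nums a < pvNge nums b ∨ (pvNge nums a = pvNge nums b ∧ b < a)) := by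
  unfold pvKey
  set n := nums.length
  rcases Nat.lt_trichotomy (pvNge nums a) (pvNge nums b) with h | h | h
  · have h1 : (pvNge nums a + 1) * (n + 1) ≤ pvNge nums b * (n + 1) :=
      Nat.mul_le_mul_right (n + 1) (Nat.succ_le_of_lt h)
    rw [Nat.succ_mul] at h1
    constructor
    · intro _; exact Or.inl h
    · intro _; omega
  · rw [h]
    constructor
    · intro hlt; exact Or.inr ⟨rfl, by omega⟩
    · intro hc
      rcases hc with hc | ⟨_, hc⟩
      · omega
      · omega
  · have h1 : (pvNge nums b + 1) * (n + 1) ≤ pvNge nums a * (n + 1) :=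
      Nat.mul_le_mul_right (n + 1) (Nat.succ_le_of_lt h)
    rw [Nat.succ_mul] at h1
    constructor
    · intro hlt; omega
    · intro hc
      rcases hc with hc | ⟨hc, _⟩
      · omega
      · omega

lemma pv_insertBy_congr {α : Type} (p q : α → α → Bool) (S : List α) (x : α) (acc : List α)
    (hx : x ∈ S) (hacc : ∀ a ∈ acc, a ∈ S) (h : ∀ a ∈ S, ∀ b ∈ S, p a b = q a b) :
    PySem.List.insertBy p x acc = PySem.List.insertBy q x acc := by
  induction acc with
  | nil => rfl
  | cons y ys ih =>
    have hy : y ∈ S := hacc y List.mem_cons_self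
    have hpq : p x y = q x y := h x hx y hy
    show (if p x y = true then x :: y :: ys else y :: PySem.List.insertBy p x ys)
       = (if q x y = true then x :: y :: ys else y :: PySem.List.insertBy q x ys)
    rw [hpq, ih (fun a ha => hacc a (List.mem_cons_of_mem y ha))]

lemma pv_foldl_insertBy_congr {α : Type} (p q : α → α → Bool) (S : List α)
    (h : ∀ a ∈ S, ∀ b ∈ S, p a b = q a b) :
    ∀ (xs acc : List α), (∀ a ∈ xs, a ∈ S) → (∀ a ∈ acc, a ∈ S) →
    xs.foldl (fun acc x => PySem.List.insertBy p x acc) acc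
      = xs.foldl (fun acc x => PySem.List.insertBy q x acc) acc := by
  intro xs
  induction xs with
  | nil => intro acc _ _; rfl
  | cons x xs ih =>
    intro acc hxs hacc
    have hx : x ∈ S := hxs x List.mem_cons_self
    simp only [List.foldl_cons]
    rw [pv_insertBy_congr p q S x acc hx hacc h]
    apply ih _ (fun a ha => hxs a (List.mem_cons_of_mem x ha))
    intro a ha
    rcases (PySem.List.mem_insertBy _ _ _ _).mp ha with rfl | ha'
    · exact hx
    · exact hacc a ha'

-- B's tuple-key sort equals the single-Nat-key sort on range n
lemma pv_sorted2_eq (nums : List Int) :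
    PySem.List.sorted2 (List.range nums.length)
        (fun i => (((List.range nums.length).map (fun i => pvNge nums i)).getD i 0))
        (fun i => -(i : Int))
      = PySem.List.sorted (List.range nums.length) (pvKey nums) := by
  show (List.range nums.length).foldl (fun acc x => PySem.List.insertBy _ x acc) []
     = (List.range nums.length).foldl (fun acc x => PySem.List.insertBy _ x acc) []
  apply pv_foldl_insertBy_congr _ _ (List.range nums.length) _ _ _ (fun a ha => ha)
    (by intro a ha; simp at ha)
  intro a ha b hb
  simp only [Bool.false_eq_true, if_false]
  rw [List.mem_range] at ha hb
  have hgd : ∀ m, m < nums.length →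
      (((List.range nums.length).map (fun i => pvNge nums i)).getD m 0) = pvNge nums m := by
    intro m hm
    simp [List.getD_eq_getElem?_getD, hm]
  rw [Bool.eq_iff_iff]
  simp only [Bool.or_eq_true, Bool.and_eq_true, Bool.not_eq_eq_eq_not, Bool.not_true,
    decide_eq_true_eq, decide_eq_false_iff_not]
  rw [hgd a ha, hgd b hb, pvKey_lt_iff nums a b ha hb]
  omega

lemma pv_fold_set_length (n : Nat) :
    ∀ (ps : List (Int × Nat)) (ranks : List Int),
    (ps.foldl (fun ranks ki => ranks.set ki.2 ((n : Int) - ki.1)) ranks).length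
      = ranks.length := by
  intro ps
  induction ps with
  | nil => intro ranks; rfl
  | cons p ps ih => intro ranks; simp [ih, List.length_set]

lemma pv_fold_enum_getElem (n : Nat) (order : List Nat) :
    ∀ (ranks : List Int) (s : Int) (k : Nat) (_ : order.Nodup) (hk : k < ranks.length),
    ((PySem.List.enumerate order s).foldl
        (fun ranks ki => ranks.set ki.2 ((n : Int) - ki.1)) ranks)[k]'
      (by rw [pv_fold_set_length]; exact hk)
      = if k ∈ order then (n : Int) - (s + (order.idxOf k : Nat)) else ranks[k] := by
  induction order with
  | nil => intro ranks s k _ hk; simp [PySem.List.enumerate]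
  | cons e es ih =>
    intro ranks s k hnd hk
    rw [List.nodup_cons] at hnd
    obtain ⟨he, hnd'⟩ := hnd
    have hk' : k < (ranks.set e ((n : Int) - s)).length := by simpa using hk
    simp only [PySem.List.enumerate_cons, List.foldl_cons]
    rw [ih (ranks.set e ((n : Int) - s)) (s + 1) k hnd' hk']
    by_cases hkes : k ∈ es
    · have hne : k ≠ e := fun h => he (h ▸ hkes)
      have hidx : (e :: es).idxOf k = es.idxOf k + 1 :=
        List.idxOf_cons_ne _ (fun h => hne h.symm)
      simp only [hkes, if_true, List.mem_cons, or_true, if_true, hidx]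
      congr 1
      push_cast
      ring
    · simp only [hkes, if_false]
      by_cases hke : k = e
      · subst hke
        have : k ∈ k :: es := List.mem_cons_self
        simp only [this, if_true, List.idxOf_cons_self, Nat.cast_zero, add_zero]
        rw [List.getElem_set_self (by simpa using hk)]
      · have : k ∉ e :: es := by simp [hke, hkes]
        simp only [this, if_false]
        rw [List.getElem_set_ne (fun h => hke (by omega))]

lemma pv_alt_eq (nums : List Int) :
    find_ranks_alt nums
      = (List.range nums.length).map (fun k => (nums.length : Int) - pvP nums k) := by
  unfold find_ranks_alt
  simp only []
  rw [pv_sorted2_eq nums]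
  set n := nums.length with hn
  set order := PySem.List.sorted (List.range n) (pvKey nums) with horder
  have hperm : order.Perm (List.range n) := PySem.List.sorted_perm _ _ _
  have hnd : order.Nodup := (List.Perm.nodup_iff hperm).mpr List.nodup_range
  have hmemr : ∀ a, a ∈ order ↔ a < n := by
    intro a
    rw [hperm.mem_iff, List.mem_range]
  have hpw : order.Pairwise (fun a b => pvKey nums a < pvKey nums b) := by
    have hle : order.Pairwise (fun a b => pvKey nums a ≤ pvKey nums b) :=
      PySem.List.sorted_pairwise _ _
    have hne : order.Pairwise (fun a b => a ≠ b) := hnd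
    apply List.Pairwise.imp_of_mem ?_ (hle.and hne)
    intro a b ha hb hab
    obtain ⟨h1, h2⟩ := hab
    rcases Nat.lt_or_ge (pvKey nums a) (pvKey nums b) with h | h
    · exact h
    · exfalso
      have hkeq : pvKey nums a = pvKey nums b := by omega
      have ha' : a < n := (hmemr a).mp ha
      have hb' : b < n := (hmemr b).mp hb
      rcases Nat.lt_trichotomy a b with hlt | heq | hgt
      · have := (pvKey_lt_iff nums b a hb' ha').not.mpr
        rcases Nat.lt_trichotomy (pvNge nums a) (pvNge nums b) with hg | hg | hg
        · exact absurd ((pvKey_lt_iff nums a b ha' hb').mpr (Or.inl hg)) (by omega)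
        · exact absurd ((pvKey_lt_iff nums b a hb' ha').mpr (Or.inr ⟨hg.symm, hlt⟩)) (by omega)
        · exact absurd ((pvKey_lt_iff nums b a hb' ha').mpr (Or.inl hg)) (by omega)
      · exact h2 heq
      · rcases Nat.lt_trichotomy (pvNge nums a) (pvNge nums b) with hg | hg | hg
        · exact absurd ((pvKey_lt_iff nums a b ha' hb').mpr (Or.inl hg)) (by omega)
        · exact absurd ((pvKey_lt_iff nums a b ha' hb').mpr (Or.inr ⟨hg, hgt⟩)) (by omega)
        · exact absurd ((pvKey_lt_iff nums b a hb' ha').mpr (Or.inl hg)) (by omega)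
  apply List.ext_getElem
  · rw [pv_fold_set_length]
    simp
  · intro k h1 h2
    have hk : k < n := by simpa using h2
    have hklen : k < (List.replicate n (0 : Int)).length := by simpa using hk
    rw [pv_fold_enum_getElem n order (List.replicate n 0) 0 k hnd hklen]
    have hkm : k ∈ order := (hmemr k).mpr hk
    rw [if_pos hkm]
    have hidx : order.idxOf k
        = (order.filter (fun j => decide (pvKey nums j < pvKey nums k))).length :=
      pv_idxOf_asc (pvKey nums) order hpw k hkm
    have hcount : (order.filter (fun j => decide (pvKey nums j < pvKey nums k))).length
        = ((List.range n).filter (fun j => decide (pvKey nums j < pvKey nums k))).length := by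
      rw [← List.countP_eq_length_filter, ← List.countP_eq_length_filter]
      exact hperm.countP_eq _
    have hP : ((List.range n).filter (fun j => decide (pvKey nums j < pvKey nums k))).length
        = pvP nums k := by
      unfold pvP
      congr 1
      apply List.filter_congr
      intro j hj
      rw [List.mem_range] at hj
      rw [Bool.eq_iff_iff, decide_eq_true_eq, decide_eq_true_eq]
      rw [pvKey_lt_iff nums j k hj hk]
    rw [hidx, hcount, hP]
    simp only [List.getElem_map, List.getElem_range]
    ring

-- ===== VERDICT (by name: the statement is the Claim_ definition above) =====
theorem find_ranks_spec : Claim_equal_find_ranks := by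
  intro nums _ hpre
  unfold Spec_find_ranks
  have hn : 1 ≤ nums.length := List.length_pos_of_ne_nil hpre
  rw [pv_alt_eq]
  have h0 : pvStack nums 0 = [0] := by
    unfold pvStack
    have h00 : decide (0 < pvNge nums 0) = true := by
      simp [pvNge_gt nums 0 (by omega)]
    simp [List.range_one, h00]
  have h1 : pvRanks nums 0 = List.replicate nums.length 0 := by
    unfold pvRanks
    have hc : ∀ k ∈ List.range nums.length,
        (if pvNge nums k ≤ 0 then ((nums.length : Int) - pvP nums k) else 0) = (0 : Int) := by
      intro k hk
      rw [List.mem_range] at hk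
      have := pvNge_gt nums k hk
      rw [if_neg (by omega)]
    rw [List.map_congr_left hc]
    rw [List.map_const', List.length_range]
  have h2 : pvMr nums 0 = 0 := by
    unfold pvMr
    rw [List.filter_eq_nil_iff.mpr (fun k hk => by
      rw [List.mem_range] at hk
      have := pvNge_gt nums k hk
      simp only [decide_eq_true_eq]
      omega)]
    rfl
  have := pvLoop_inv nums (nums.length - 1) 0 (by omega) (by omega)
  rw [h0, h1, h2] at this
  unfold find_ranks
  simpa using this
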